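-- pv_equiv track=rewrite | github.com/BYLinMou/GenVideo | backend/app/services/video_service.py | _merge_tts_pieces
-- ===== SOURCE A (Python) =====
-- _NARRATOR_VOICE_ID = "zh-CN-YunxiNeural"
--
-- def _merge_tts_pieces(pieces: list[tuple[str, str]]) -> list[tuple[str, str]]:
--     merged: list[tuple[str, str]] = []
--     for text, voice in pieces:
--         current_text = (text or "").strip()
--         if not current_text:
--             continue
--         current_voice = (voice or _NARRATOR_VOICE_ID).strip() or _NARRATOR_VOICE_ID
--         if merged and merged[-1][1] == current_voice:
--             merged[-1] = (merged[-1][0] + current_text, current_voice)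
--         else:
--             merged.append((current_text, current_voice))
--     return merged
-- ===== SOURCE B (Python) =====
-- _NARRATOR_VOICE_ID = "zh-CN-YunxiNeural"
--
-- def _merge_tts_pieces(pieces):
--     # phase 1: normalize — strip texts, drop empties, default the voice
--     norm = []
--     for text, voice in pieces:
--         t = (text or "").strip()
--         if not t:
--             continue
--         norm.append((t, (voice or _NARRATOR_VOICE_ID).strip() or _NARRATOR_VOICE_ID))
--     # phase 2: group consecutive equal-voice runs with a pending-run accumulator
--     out = []
--     cur_text = None
--     cur_voice = None
--     for t, v in norm:
--         if cur_voice is not None and v == cur_voice: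
--             cur_text += t
--         else:
--             if cur_voice is not None:
--                 out.append((cur_text, cur_voice))
--             cur_text, cur_voice = t, v
--     if cur_voice is not None:
--         out.append((cur_text, cur_voice))
--     return out
-- ===== Notes on version B (the rewrite author's own statement) =====
-- stated objective: alternative
-- what changed: Replaces A's single pass that re-indexes and rewrites merged[-1] with a two-phase structure: first build a normalized list (strip text, drop empties, default the voice), then group consecutive equal-voice runs with a pending-run scalar accumulator flushed at voice transitions.
import Mathlib
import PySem

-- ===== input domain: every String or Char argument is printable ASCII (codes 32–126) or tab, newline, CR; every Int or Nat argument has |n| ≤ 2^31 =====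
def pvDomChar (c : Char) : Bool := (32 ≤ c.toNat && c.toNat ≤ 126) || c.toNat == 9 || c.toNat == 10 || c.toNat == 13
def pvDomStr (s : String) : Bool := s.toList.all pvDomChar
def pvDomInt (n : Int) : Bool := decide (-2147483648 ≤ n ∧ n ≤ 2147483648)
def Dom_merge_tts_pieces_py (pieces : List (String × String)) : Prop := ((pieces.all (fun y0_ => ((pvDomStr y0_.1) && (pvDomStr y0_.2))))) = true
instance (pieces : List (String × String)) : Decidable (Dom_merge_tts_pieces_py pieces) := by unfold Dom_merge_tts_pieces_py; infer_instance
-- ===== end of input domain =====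

-- B rewrites A's one-pass merged[-1]-rewriting loop as two phases (normalize, then group
-- consecutive equal-voice runs with a pending-run accumulator); same values, same cost class.

def pvNarrator : String := "zh-CN-YunxiNeural"

-- ===== PORT A =====
-- loop body of A's for-loop ('continue' = return merged unchanged; 'merged[-1] = …' =
-- dropLast ++ [rewritten last]); '(text or "").strip()' = strip of text (strip "" = "")
def mergeStepA (merged : List (String × String)) (p : String × String) : List (String × String) :=
  let current_text := PySem.Str.strip p.1
  if current_text = "" then merged
  else
    let current_voice :=
      let v0 := PySem.Str.strip (if p.2 = "" then pvNarrator else p.2)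
      if v0 = "" then pvNarrator else v0
    match merged.getLast? with
    | some last =>
      if last.2 = current_voice then
        merged.dropLast ++ [(last.1 ++ current_text, current_voice)]
      else merged ++ [(current_text, current_voice)]
    | none => merged ++ [(current_text, current_voice)]

def merge_tts_pieces_py (pieces : List (String × String)) : List (String × String) :=
  pieces.foldl mergeStepA []

-- ===== PORT B =====
-- phase 1 loop body: append the normalized piece, skipping empty texts
def normStepB (norm : List (String × String)) (p : String × String) : List (String × String) :=
  let t := PySem.Str.strip p.1
  if t = "" then norm
  else
    norm ++ [(t,
      let v0 := PySem.Str.strip (if p.2 = "" then pvNarrator else p.2)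
      if v0 = "" then pvNarrator else v0)]

-- phase 2 loop body: state = (pending run (cur_text, cur_voice) or none, out)
def groupStepB (st : Option (String × String) × List (String × String)) (q : String × String) :
    Option (String × String) × List (String × String) :=
  match st.1 with
  | some cur =>
    if q.2 = cur.2 then (some (cur.1 ++ q.1, cur.2), st.2)
    else (some q, st.2 ++ [cur])
  | none => (some q, st.2)

def merge_tts_pieces_py_alt (pieces : List (String × String)) : List (String × String) :=
  let norm := pieces.foldl normStepB []
  let st := norm.foldl groupStepB (none, [])
  match st.1 with
  | some cur => st.2 ++ [cur]
  | none => st.2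

-- ===== PRECONDITION & SPEC =====
def Spec_merge_tts_pieces_py (pieces : List (String × String)) (out : List (String × String)) : Prop := out = merge_tts_pieces_py_alt pieces
instance (pieces : List (String × String)) (out : List (String × String)) : Decidable (Spec_merge_tts_pieces_py pieces out) := by unfold Spec_merge_tts_pieces_py; infer_instance

-- ===== CLAIM (what is proved, stated in full; the proofs are below) =====
def Claim_equal_merge_tts_pieces_py : Prop := ∀ (pieces : List (String × String)), Dom_merge_tts_pieces_py pieces → Spec_merge_tts_pieces_py pieces (merge_tts_pieces_py pieces)

-- ===== LEMMAS AND PROOFS =====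

-- the defaulted voice of a raw piece
def pvVoiceOf (v : String) : String :=
  let v0 := PySem.Str.strip (if v = "" then pvNarrator else v)
  if v0 = "" then pvNarrator else v0

-- the normalized list both programs work through
def pvNormList (pieces : List (String × String)) : List (String × String) :=
  pieces.filterMap (fun p =>
    if PySem.Str.strip p.1 = "" then none
    else some (PySem.Str.strip p.1, pvVoiceOf p.2))

-- canonical merge step on an already-normalized piece
def pvStep (merged : List (String × String)) (q : String × String) : List (String × String) :=
  match merged.getLast? with
  | some last =>
    if last.2 = q.2 then merged.dropLast ++ [(last.1 ++ q.1, q.2)]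
    else merged ++ [q]
  | none => merged ++ [q]

theorem mergeStepA_eq (acc : List (String × String)) (p : String × String) :
    mergeStepA acc p =
      if PySem.Str.strip p.1 = "" then acc
      else pvStep acc (PySem.Str.strip p.1, pvVoiceOf p.2) := by
  simp only [mergeStepA, pvStep, pvVoiceOf]

theorem foldA_eq (pieces : List (String × String)) :
    ∀ acc, pieces.foldl mergeStepA acc = (pvNormList pieces).foldl pvStep acc := by
  induction pieces with
  | nil => intro acc; rfl
  | cons p rest ih =>
    intro acc
    simp only [pvNormList, List.filterMap_cons, List.foldl_cons]
    by_cases h : PySem.Str.strip p.1 = ""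
    · simp only [h, mergeStepA_eq, ih]
      simp [pvNormList]
    · simp only [h, mergeStepA_eq, ih]
      simp [pvNormList]

theorem foldNorm_eq (pieces : List (String × String)) :
    ∀ acc, pieces.foldl normStepB acc = acc ++ pvNormList pieces := by
  induction pieces with
  | nil => intro acc; simp [pvNormList]
  | cons p rest ih =>
    intro acc
    simp only [pvNormList, List.filterMap_cons, List.foldl_cons]
    by_cases h : PySem.Str.strip p.1 = ""
    · simp only [normStepB, h, ih]
      simp [pvNormList]
    · simp only [normStepB, h, ih]
      simp [pvNormList, pvVoiceOf]

-- flush of phase-2 state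
def pvFlush (st : Option (String × String) × List (String × String)) : List (String × String) :=
  match st.1 with
  | some cur => st.2 ++ [cur]
  | none => st.2

theorem foldGroup_some (ns : List (String × String)) :
    ∀ out cur, pvFlush (ns.foldl groupStepB (some cur, out)) =
      ns.foldl pvStep (out ++ [cur]) := by
  induction ns with
  | nil => intro out cur; rfl
  | cons q rest ih =>
    intro out cur
    simp only [List.foldl_cons, groupStepB]
    by_cases h : q.2 = cur.2
    · have hs : pvStep (out ++ [cur]) q = out ++ [(cur.1 ++ q.1, cur.2)] := by
        simp [pvStep, h]
      rw [if_pos h, ih, hs]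
    · have hs : pvStep (out ++ [cur]) q = (out ++ [cur]) ++ [q] := by
        simp [pvStep]
        intro hc; exact absurd hc.symm h
      rw [if_neg h, ih, hs]

theorem foldGroup_none (ns : List (String × String)) :
    pvFlush (ns.foldl groupStepB (none, [])) = ns.foldl pvStep [] := by
  cases ns with
  | nil => rfl
  | cons q rest =>
    simp only [List.foldl_cons, groupStepB]
    rw [foldGroup_some]
    rfl

-- ===== VERDICT (by name: the statement is the Claim_ definition above) =====
theorem merge_tts_pieces_py_spec : Claim_equal_merge_tts_pieces_py := by
  intro pieces _
  unfold Spec_merge_tts_pieces_py merge_tts_pieces_py merge_tts_pieces_py_alt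
  rw [foldA_eq, foldNorm_eq]
  have h := foldGroup_none (pvNormList pieces)
  simp only [List.nil_append] at *
  rw [← h]
  rfl
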